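-- pv_equiv track=rewrite | github.com/gnyanmuliya/Friska-fit-demo | core/fitness.py | get_weekly_split
-- ===== SOURCE A (Python) =====
-- from typing import List, Dict, Set, Optional, Tuple, Any
--
-- def get_weekly_split(goal: str, num_days: int) -> List[str]:
--     cycle = [
--         "Upper Focus",
--         "Lower Focus",
--         "Cardio Focus",
--         "Core Focus",
--         "Full Body",
--     ]
--     count = max(1, int(num_days or 1))
--     return [cycle[i % len(cycle)] for i in range(count)]
-- ===== SOURCE B (Python) =====
-- def get_weekly_split(goal: str, num_days: int):
--     count = max(1, int(num_days or 1))
--     rot = [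
--         "Upper Focus",
--         "Lower Focus",
--         "Cardio Focus",
--         "Core Focus",
--         "Full Body",
--     ]
--     out = []
--     for _ in range(count):
--         out.append(rot[0])
--         rot = rot[1:] + rot[:1]
--     return out
-- ===== Notes on version B (the rewrite author's own statement) =====
-- stated objective: alternative
-- what changed: B maintains a rotating queue of labels (emit the head, move it to the back each step) instead of A's modulo-indexed comprehension over a fixed list.
import Mathlib
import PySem

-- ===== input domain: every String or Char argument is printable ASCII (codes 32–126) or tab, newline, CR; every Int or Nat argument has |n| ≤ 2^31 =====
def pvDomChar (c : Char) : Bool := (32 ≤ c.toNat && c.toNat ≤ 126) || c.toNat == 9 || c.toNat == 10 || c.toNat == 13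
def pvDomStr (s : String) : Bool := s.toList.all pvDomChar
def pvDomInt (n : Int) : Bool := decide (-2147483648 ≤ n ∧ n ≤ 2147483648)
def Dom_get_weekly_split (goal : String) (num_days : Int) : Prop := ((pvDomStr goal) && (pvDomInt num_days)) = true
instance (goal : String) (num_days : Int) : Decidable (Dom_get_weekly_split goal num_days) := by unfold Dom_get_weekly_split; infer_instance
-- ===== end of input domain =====

-- B maintains a rotating queue of labels (emit the head, move it to the back each step)
-- instead of A's modulo-indexed comprehension over a fixed list (objective: alternative).

-- ===== PORT A =====
def get_weekly_split (goal : String) (num_days : Int) : List String :=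
  let cycle : List String :=
    ["Upper Focus", "Lower Focus", "Cardio Focus", "Core Focus", "Full Body"]
  -- count = max(1, int(num_days or 1)); `num_days or 1` is 1 iff num_days == 0
  let count : Int := max 1 (if num_days = 0 then 1 else num_days)
  -- [cycle[i % len(cycle)] for i in range(count)]; the index i % 5 is always in range,
  -- so pyGetD with an arbitrary default is exact here
  (PySem.List.pyRange 0 count 1).map
    (fun i => PySem.List.pyGetD cycle (PySem.Int.mod i (cycle.length : Int)) "")

-- ===== PORT B =====
-- the loop body: out.append(rot[0]); rot = rot[1:] + rot[:1], run `n` times;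
-- rot is never empty in B (it starts as the 5-element literal and rotation preserves
-- length), so the [] branch — where Python's rot[0] would raise — is unreachable
def pvRotLoop : Nat → List String → List String
  | 0, _ => []
  | _ + 1, [] => []
  | n + 1, x :: xs => x :: pvRotLoop n (xs ++ [x])

def get_weekly_split_alt (goal : String) (num_days : Int) : List String :=
  let count : Int := max 1 (if num_days = 0 then 1 else num_days)
  pvRotLoop count.toNat
    ["Upper Focus", "Lower Focus", "Cardio Focus", "Core Focus", "Full Body"]

-- ===== PRECONDITION & SPEC =====
def Spec_get_weekly_split (goal : String) (num_days : Int) (out : List String) : Prop := out = get_weekly_split_alt goal num_days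
instance (goal : String) (num_days : Int) (out : List String) : Decidable (Spec_get_weekly_split goal num_days out) := by unfold Spec_get_weekly_split; infer_instance

-- ===== CLAIM (what is proved, stated in full; the proofs are below) =====
def Claim_equal_get_weekly_split : Prop := ∀ (goal : String) (num_days : Int), Dom_get_weekly_split goal num_days → Spec_get_weekly_split goal num_days (get_weekly_split goal num_days)

-- ===== LEMMAS AND PROOFS =====

-- rotating the queue by one shifts the modular index by one
theorem pv_rot_getD (x : String) (xs : List String) (k : Nat) :
    (xs ++ [x]).getD (k % (xs.length + 1)) "" =
      (x :: xs).getD ((k + 1) % (xs.length + 1)) "" := by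
  set L := xs.length + 1 with hL
  have hlt : k % L < L := Nat.mod_lt _ (by omega)
  by_cases h : k % L = xs.length
  · have h1 : (k + 1) % L = 0 := by
      rw [Nat.add_mod, h]
      rcases Nat.eq_zero_or_pos xs.length with h0 | h0
      · simp [hL, h0]
      · have e1 : 1 % L = 1 := Nat.mod_eq_of_lt (by omega)
        rw [e1, hL, Nat.mod_self]
    rw [h, h1]
    rw [List.getD_append_right _ _ _ _ (le_refl _)]
    simp
  · have hk : k % L < xs.length := by omega
    have h1 : (k + 1) % L = k % L + 1 := by
      rw [Nat.add_mod]
      have e1 : 1 % L = 1 := Nat.mod_eq_of_lt (by omega)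
      rw [e1]
      exact Nat.mod_eq_of_lt (by omega)
    rw [h1, List.getD_append _ _ _ _ hk, List.getD_cons_succ]

-- the rotating-queue loop computes the modulo-indexed comprehension
theorem pv_rotLoop_eq (n : Nat) (rot : List String) (h : rot ≠ []) :
    pvRotLoop n rot = (List.range n).map (fun k => rot.getD (k % rot.length) "") := by
  induction n generalizing rot with
  | zero => simp [pvRotLoop]
  | succ n ih =>
    match rot, h with
    | x :: xs, _ =>
      rw [pvRotLoop, ih (xs ++ [x]) (by simp)]
      rw [List.range_succ_eq_map, List.map_cons, List.map_map]
      simp only [List.length_cons, List.length_append,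
        Function.comp_def, List.getD_cons_zero, Nat.zero_mod]
      congr 1
      apply List.map_congr_left
      intro k _
      exact pv_rot_getD x xs k

def pvCycle : List String :=
  ["Upper Focus", "Lower Focus", "Cardio Focus", "Core Focus", "Full Body"]

-- ===== VERDICT (by name: the statement is the Claim_ definition above) =====
theorem get_weekly_split_spec : Claim_equal_get_weekly_split := by
  intro goal num_days _
  unfold Spec_get_weekly_split get_weekly_split get_weekly_split_alt
  simp only []
  set count : Int := max 1 (if num_days = 0 then 1 else num_days) with hc
  have hpos : 1 ≤ count := le_max_left _ _
  obtain ⟨c, hcnat⟩ : ∃ c : Nat, count = (c : Int) :=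
    ⟨count.toNat, (Int.toNat_of_nonneg (by omega)).symm⟩
  rw [hcnat, PySem.List.pyRange_one]
  have h0 : ((c : Int) - 0).toNat = c := by omega
  have ht : ((c : Int)).toNat = c := by omega
  rw [h0, ht]
  rw [pv_rotLoop_eq c _ (by simp)]
  rw [List.map_map]
  apply List.map_congr_left
  intro k _
  show PySem.List.pyGetD pvCycle (PySem.Int.mod ((0 : Int) + (k : Int)) (pvCycle.length : Int)) "" =
    pvCycle.getD (k % pvCycle.length) ""
  have : PySem.Int.mod ((0 : Int) + (k : Int)) (pvCycle.length : Int)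
      = ((k % pvCycle.length : Nat) : Int) := by
    rw [zero_add]; exact_mod_cast PySem.Int.mod_natCast k pvCycle.length
  rw [this, PySem.List.pyGetD_natCast]
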